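-- pv_equiv track=rewrite | github.com/lsk74669/Coding_Test | 프로그래머스/0/181867. x 사이의 개수/x 사이의 개수.py | solution
-- ===== SOURCE A (Python) =====
-- def solution(myString):
--     stack = []
--     answer = []
--
--     for i in myString:
--         if i == 'x':
--             answer.append(len(stack))
--             stack = []
--         else:
--             stack.append(i)
--
--     if len(stack) == 0:
--         answer.append(0)
--     else:
--         answer.append(len(stack))
--
--     return answer
-- ===== SOURCE B (Python) =====
-- def solution(myString):
--     return [len(seg) for seg in myString.split('x')]
-- ===== Notes on version B (the rewrite author's own statement) =====
-- stated objective: idiomatic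
-- what changed: Replaces the character-by-character accumulate-and-reset loop (with an explicit stack list and a final conditional append) by library segmentation: split the string on the separator and map len over the segments; the C-level split gives a constant-factor speedup.
import Mathlib
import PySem

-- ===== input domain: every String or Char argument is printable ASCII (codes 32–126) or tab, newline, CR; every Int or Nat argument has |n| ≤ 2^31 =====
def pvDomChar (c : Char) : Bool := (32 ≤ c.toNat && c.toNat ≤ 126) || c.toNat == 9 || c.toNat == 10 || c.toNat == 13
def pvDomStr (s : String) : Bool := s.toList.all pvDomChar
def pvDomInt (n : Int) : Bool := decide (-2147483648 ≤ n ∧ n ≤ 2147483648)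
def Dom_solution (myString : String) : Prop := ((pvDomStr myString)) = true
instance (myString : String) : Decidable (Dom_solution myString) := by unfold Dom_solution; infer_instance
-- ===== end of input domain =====

-- B replaces A's accumulate-and-reset character loop by split('x') + map len (idiomatic; same cost).

-- ===== PORT A =====
-- literal transliteration: fold over the characters keeping (stack, answer), then the final conditional append
def solution (myString : String) : List Int :=
  let st := myString.toList.foldl
    (fun (p : List Char × List Int) i =>
      if i = 'x' then ([], p.2 ++ [PySem.List.len p.1])
      else (p.1 ++ [i], p.2))
    ([], [])
  if PySem.List.len st.1 = 0 then st.2 ++ [(0 : Int)] else st.2 ++ [PySem.List.len st.1]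

-- ===== PORT B =====
-- myString.split('x') → PySem.Chars.splitOn (the sep ≠ "" form of str.split); len(seg) → PySem.Chars.len
def solution_alt (myString : String) : List Int :=
  (PySem.Chars.splitOn myString.toList ['x']).map (fun seg => PySem.Chars.len seg)

-- ===== PRECONDITION & SPEC =====
def Spec_solution (myString : String) (out : List Int) : Prop := out = solution_alt myString
instance (myString : String) (out : List Int) : Decidable (Spec_solution myString out) := by unfold Spec_solution; infer_instance

-- ===== CLAIM (what is proved, stated in full; the proofs are below) =====
def Claim_equal_solution : Prop := ∀ (myString : String), Dom_solution myString → Spec_solution myString (solution myString)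

-- ===== LEMMAS AND PROOFS =====

/-- Reference segmentation: `pvF l cur` is the list of segments of `cur.reverse ++ l`
    split on 'x' (cur is the pending segment, most-recent char first). -/
def pvF : List Char → List Char → List (List Char)
  | [], cur => [cur.reverse]
  | c :: rest, cur => if c = 'x' then cur.reverse :: pvF rest [] else pvF rest (c :: cur)

lemma pvGo_spec : ∀ (fuel : Nat) (l cur : List Char) (acc : List (List Char)),
    l.length < fuel →
    PySem.Chars.splitOn.go ['x'] fuel l cur acc = acc.reverse ++ pvF l cur := by
  intro fuel
  induction fuel with
  | zero => intro l cur acc h; omega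
  | succ n ih =>
    intro l cur acc h
    cases l with
    | nil => simp [PySem.Chars.splitOn.go, pvF]
    | cons c rest =>
      rw [PySem.Chars.splitOn.go]
      by_cases hc : c = 'x'
      · subst hc
        simp only [List.isPrefixOf, if_pos rfl]
        simp only [beq_self_eq_true, Bool.true_and, List.isPrefixOf_nil_left, if_pos rfl]
        rw [ih _ _ _ (by simpa using Nat.lt_of_succ_lt_succ h)]
        simp [pvF]
      · have : (['x'].isPrefixOf (c :: rest)) = false := by
          simp [List.isPrefixOf, Ne.symm hc]
        rw [this]
        simp only [Bool.false_eq_true, if_false]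
        rw [ih _ _ _ (by simpa using Nat.lt_of_succ_lt_succ h)]
        simp [pvF, hc]

lemma pvSplitOn_eq (cs : List Char) : PySem.Chars.splitOn cs ['x'] = pvF cs [] := by
  unfold PySem.Chars.splitOn
  rw [pvGo_spec _ _ _ _ (by omega)]
  simp

/-- A's loop (from any state) followed by its final append computes the answer so far
    plus the lengths of the remaining segments. -/
lemma pvFold_spec : ∀ (cs stack : List Char) (answer : List Int),
    (let st := cs.foldl
      (fun (p : List Char × List Int) i =>
        if i = 'x' then ([], p.2 ++ [PySem.List.len p.1])
        else (p.1 ++ [i], p.2))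
      (stack, answer)
     if PySem.List.len st.1 = 0 then st.2 ++ [(0 : Int)] else st.2 ++ [PySem.List.len st.1])
    = answer ++ (pvF cs stack.reverse).map (fun seg => PySem.Chars.len seg) := by
  intro cs
  induction cs with
  | nil =>
    intro stack answer
    simp only [List.foldl_nil, pvF, List.map]
    by_cases h : stack = []
    · subst h; simp [PySem.List.len, PySem.Chars.len]
    · have hl : stack.length ≠ 0 := by simpa using h
      simp [PySem.List.len, PySem.Chars.len, hl]
  | cons c rest ih =>
    intro stack answer
    by_cases hc : c = 'x'
    · subst hc
      simp only [List.foldl_cons, if_pos rfl, if_true]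
      rw [ih [] (answer ++ [PySem.List.len stack])]
      simp [pvF, PySem.List.len, PySem.Chars.len]
    · simp only [List.foldl_cons, if_neg hc]
      rw [ih (stack ++ [c]) answer]
      simp [pvF, hc]

-- ===== VERDICT (by name: the statement is the Claim_ definition above) =====
theorem solution_spec : Claim_equal_solution := by
  intro myString _
  unfold Spec_solution solution solution_alt
  rw [pvSplitOn_eq]
  simpa using pvFold_spec myString.toList [] []
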